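-- pv_equiv track=rewrite | github.com/gobi-ms/xertica | xertica_monitor.py | pick_value_by_labels
-- ===== SOURCE A (Python) =====
-- from typing import List, Dict, Any, Optional
--
-- def pick_value_by_labels(rows: List[Dict[str, str]], label_keys: List[str]) -> str:
--     for r in rows:
--         lab = (r.get("label") or "").strip().lower()
--         val = (r.get("value") or "").strip()
--         if not val:
--             continue
--         for key in label_keys:
--             if key.lower() in lab:
--                 return val
--     for r in rows:
--         lab = (r.get("label") or "").strip().lower()
--         val = (r.get("value") or "").strip()
--         if lab == "" and val and val.replace(",", "").isdigit():
--             return val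
--     return ""
-- ===== SOURCE B (Python) =====
-- def pick_value_by_labels(rows, label_keys):
--     # Single pass: return immediately on a primary label match, remember the
--     # first numeric unlabeled value as a fallback, return it after the loop.
--     fallback = None
--     for r in rows:
--         lab = (r.get("label") or "").strip().lower()
--         val = (r.get("value") or "").strip()
--         if val and any(key.lower() in lab for key in label_keys):
--             return val
--         if fallback is None and lab == "" and val and val.replace(",", "").isdigit():
--             fallback = val
--     return fallback if fallback is not None else ""
-- ===== Notes on version B (the rewrite author's own statement) =====
-- stated objective: simpler
-- what changed: Replaces A's two sequential scans of rows with a single pass that returns immediately on a primary label match and records the first numeric unlabeled value as a post-loop fallback.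
import Mathlib
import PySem

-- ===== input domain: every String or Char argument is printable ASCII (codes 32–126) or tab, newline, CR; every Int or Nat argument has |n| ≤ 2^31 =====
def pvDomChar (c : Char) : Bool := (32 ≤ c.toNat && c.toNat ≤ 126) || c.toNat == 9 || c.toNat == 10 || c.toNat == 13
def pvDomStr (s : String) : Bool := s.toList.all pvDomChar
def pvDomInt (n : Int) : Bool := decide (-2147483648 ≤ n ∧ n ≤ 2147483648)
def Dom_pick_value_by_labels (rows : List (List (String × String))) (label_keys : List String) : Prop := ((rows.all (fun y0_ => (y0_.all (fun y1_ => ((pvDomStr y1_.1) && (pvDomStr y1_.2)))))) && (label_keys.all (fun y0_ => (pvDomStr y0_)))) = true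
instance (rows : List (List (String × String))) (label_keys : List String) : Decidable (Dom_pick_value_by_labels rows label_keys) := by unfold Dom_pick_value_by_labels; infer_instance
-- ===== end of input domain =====

-- B replaces A's two sequential scans by one pass that returns on a primary
-- match and records the first numeric unlabeled value as a fallback (simpler).

-- ===== PORT A =====
-- lab = (r.get("label") or "").strip().lower()   (both loops compute this)
def pvRowLab (r : List (String × String)) : String :=
  PySem.Str.lower (PySem.Str.strip (((PySem.Dict.mk r).get? "label").getD ""))
-- val = (r.get("value") or "").strip()
def pvRowVal (r : List (String × String)) : String :=
  PySem.Str.strip (((PySem.Dict.mk r).get? "value").getD "")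

-- body of A's FIRST loop for one row: some val = "return val", none = continue
def pvPrim (label_keys : List String) (r : List (String × String)) : Option String :=
  let lab := pvRowLab r
  let val := pvRowVal r
  if val = "" then none
  else if label_keys.any (fun key => PySem.Str.isIn (PySem.Str.lower key) lab) then some val
  else none

-- body of A's SECOND loop for one row
def pvFall (r : List (String × String)) : Option String :=
  let lab := pvRowLab r
  let val := pvRowVal r
  if lab = "" ∧ val ≠ "" ∧ PySem.Str.strIsdigit (PySem.Str.replace val "," "") then some val
  else none

def pick_value_by_labels (rows : List (List (String × String))) (label_keys : List String) : String :=
  match rows.findSome? (pvPrim label_keys) with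
  | some v => v
  | none =>
    match rows.findSome? pvFall with
    | some v => v
    | none => ""

-- ===== PORT B =====
-- single pass; fb is the recorded fallback (None = not yet recorded)
def pickGo (label_keys : List String) (fb : Option String) :
    List (List (String × String)) → String
  | [] => fb.getD ""
  | r :: rest =>
    let lab := pvRowLab r
    let val := pvRowVal r
    if val ≠ "" ∧ label_keys.any (fun key => PySem.Str.isIn (PySem.Str.lower key) lab) then val
    else
      pickGo label_keys
        (if fb = none ∧ lab = "" ∧ val ≠ "" ∧ PySem.Str.strIsdigit (PySem.Str.replace val "," "")
         then some val else fb) rest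

def pick_value_by_labels_alt (rows : List (List (String × String))) (label_keys : List String) : String :=
  pickGo label_keys none rows

-- ===== PRECONDITION & SPEC =====
def Spec_pick_value_by_labels (rows : List (List (String × String))) (label_keys : List String) (out : String) : Prop := out = pick_value_by_labels_alt rows label_keys
instance (rows : List (List (String × String))) (label_keys : List String) (out : String) : Decidable (Spec_pick_value_by_labels rows label_keys out) := by unfold Spec_pick_value_by_labels; infer_instance

-- ===== CLAIM (what is proved, stated in full; the proofs are below) =====
def Claim_equal_pick_value_by_labels : Prop := ∀ (rows : List (List (String × String))) (label_keys : List String), Dom_pick_value_by_labels rows label_keys → Spec_pick_value_by_labels rows label_keys (pick_value_by_labels rows label_keys)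

-- ===== LEMMAS AND PROOFS =====

-- one pass with fallback fb = primary scan, else fb before the remaining fallback scan
theorem pickGo_eq (label_keys : List String) (rows : List (List (String × String)))
    (fb : Option String) :
    pickGo label_keys fb rows =
      match rows.findSome? (pvPrim label_keys) with
      | some v => v
      | none => (fb.or (rows.findSome? pvFall)).getD "" := by
  induction rows generalizing fb with
  | nil => cases fb <;> simp [pickGo]
  | cons r rest ih =>
    simp only [pickGo, List.findSome?_cons]
    by_cases hp : pvRowVal r ≠ "" ∧
        (label_keys.any fun key => PySem.Str.isIn (PySem.Str.lower key) (pvRowLab r)) = true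
    · have h1 : pvPrim label_keys r = some (pvRowVal r) := by
        simp only [pvPrim, if_neg hp.1, if_pos hp.2]
      rw [if_pos hp]
      simp [h1]
    · have h1 : pvPrim label_keys r = none := by
        by_cases hv : pvRowVal r = ""
        · simp [pvPrim, hv]
        · simp only [hv, ne_eq, not_false_eq_true, true_and, Bool.not_eq_true,
            List.any_eq_false] at hp
          simp only [pvPrim]
          simp
          intro _ x hx
          simpa using hp x hx
      have h2 : (if fb = none ∧ pvRowLab r = "" ∧ pvRowVal r ≠ "" ∧
            PySem.Str.strIsdigit (PySem.Str.replace (pvRowVal r) "," "") = true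
          then some (pvRowVal r) else fb) = fb.or (pvFall r) := by
        cases fb <;> simp [pvFall]
      rw [if_neg hp, ih, h2]
      simp only [h1]
      cases List.findSome? (pvPrim label_keys) rest <;> cases pvFall r <;> simp

-- ===== VERDICT (by name: the statement is the Claim_ definition above) =====
theorem pick_value_by_labels_spec : Claim_equal_pick_value_by_labels := by
  intro rows label_keys _
  unfold Spec_pick_value_by_labels pick_value_by_labels pick_value_by_labels_alt
  rw [pickGo_eq]
  cases h : rows.findSome? (pvPrim label_keys) <;> cases h2 : rows.findSome? pvFall <;> simp
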